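-- pv_equiv track=rewrite | github.com/cristinaimprota/Investigating-Training-Data-s-Role | 1_dataset_preprocessing_and_filtering/3_further_cleaning.py | clean_note
-- ===== SOURCE A (Python) =====
-- def clean_note(doc):
--     doc_lines = doc.split('\n')
--     cleaned_doc_lines = []
--     for line in doc_lines:
--         if line.startswith('! NOTE ! '):
--             break
--         cleaned_doc_lines.append(line)
--     return '\n'.join(cleaned_doc_lines)
-- ===== SOURCE B (Python) =====
-- def clean_note(doc):
--     if doc.startswith('! NOTE ! '):
--         return ''
--     idx = doc.find('\n! NOTE ! ')
--     if idx == -1: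
--         return doc
--     return doc[:idx]
-- ===== Notes on version B (the rewrite author's own statement) =====
-- stated objective: simpler
-- what changed: Replaces the split-into-lines loop with rejoin by a direct prefix slice: a startswith check for the marker at position 0, then a single find of the marker preceded by a newline (so it only matches at a line start) and a slice of doc up to that index.
import Mathlib
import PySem

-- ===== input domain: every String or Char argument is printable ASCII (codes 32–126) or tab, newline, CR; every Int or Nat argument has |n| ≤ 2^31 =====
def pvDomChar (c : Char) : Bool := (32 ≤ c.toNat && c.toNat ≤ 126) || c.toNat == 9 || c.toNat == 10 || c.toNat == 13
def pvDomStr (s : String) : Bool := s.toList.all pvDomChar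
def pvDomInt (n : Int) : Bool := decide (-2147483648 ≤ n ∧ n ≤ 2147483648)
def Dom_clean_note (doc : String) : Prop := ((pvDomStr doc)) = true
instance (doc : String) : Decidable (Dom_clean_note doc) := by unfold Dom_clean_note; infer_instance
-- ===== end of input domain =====

-- B replaces A's split-into-lines loop and rejoin by a direct prefix slice of the
-- original string (a startswith check at position 0, else one find of the
-- newline-anchored marker); objective: simpler.

-- ===== PORT A =====
-- the for-loop with break: collect lines until one starts with the marker
def clean_note_loop (lines : List String) (acc : List String) : List String :=
  match lines with
  | [] => acc.reverse
  | line :: rest =>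
    if PySem.Str.startswith line "! NOTE ! " then acc.reverse
    else clean_note_loop rest (line :: acc)

def clean_note (doc : String) : String :=
  match PySem.Str.split? doc "\n" with
  | none => ""
  | some doc_lines => PySem.Str.join "\n" (clean_note_loop doc_lines [])

-- ===== PORT B =====
def clean_note_alt (doc : String) : String :=
  if PySem.Str.startswith doc "! NOTE ! " then ""
  else
    let idx := PySem.Str.find doc "\n! NOTE ! "
    if idx = -1 then doc else PySem.Str.slice doc none (some idx)

-- ===== PRECONDITION & SPEC =====
def Spec_clean_note (doc : String) (out : String) : Prop := out = clean_note_alt doc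
instance (doc : String) (out : String) : Decidable (Spec_clean_note doc out) := by unfold Spec_clean_note; infer_instance

-- ===== CLAIM (what is proved, stated in full; the proofs are below) =====
def Claim_equal_clean_note : Prop := ∀ (doc : String), Dom_clean_note doc → Spec_clean_note doc (clean_note doc)

-- ===== LEMMAS AND PROOFS =====

def pvSplit (pre : List Char) : List Char → List (List Char)
  | [] => [pre]
  | c :: rest => if c = '\n' then pre :: pvSplit [] rest else pvSplit (pre ++ [c]) rest

lemma pvSplit_go_eq : ∀ (fuel : Nat) (l cur : List Char) (acc : List (List Char)),
    l.length < fuel →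
    PySem.Chars.splitOn.go ['\n'] fuel l cur acc = acc.reverse ++ pvSplit cur.reverse l := by
  intro fuel
  induction fuel with
  | zero => intro l cur acc h; omega
  | succ n ih =>
    intro l cur acc h
    cases l with
    | nil => simp [PySem.Chars.splitOn.go, pvSplit]
    | cons c rest =>
      simp only [PySem.Chars.splitOn.go]
      by_cases hc : c = '\n'
      · subst hc
        rw [if_pos (by simp [List.isPrefixOf])]
        rw [ih _ _ _ (by simp at h; simpa using h)]
        simp [pvSplit]
      · rw [if_neg (by simp [List.isPrefixOf]; intro h'; exact hc h'.symm)]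
        rw [ih _ _ _ (by simp at h ⊢; omega)]
        simp [pvSplit, hc]

lemma splitOn_eq (cs : List Char) : PySem.Chars.splitOn cs ['\n'] = pvSplit [] cs := by
  rw [PySem.Chars.splitOn, pvSplit_go_eq _ _ _ _ (by omega)]; simp

lemma pvSplit_no_nl : ∀ (l pre : List Char), '\n' ∉ l → pvSplit pre l = [pre ++ l] := by
  intro l
  induction l with
  | nil => simp [pvSplit]
  | cons c rest ih =>
    intro pre h
    simp only [List.mem_cons, not_or] at h
    have hc : ¬ c = '\n' := fun h' => h.1 h'.symm
    simp [pvSplit, hc, ih (pre ++ [c]) h.2]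

lemma pvSplit_decomp : ∀ (l0 : List Char) (t pre : List Char), '\n' ∉ l0 →
    pvSplit pre (l0 ++ '\n' :: t) = (pre ++ l0) :: pvSplit [] t := by
  intro l0
  induction l0 with
  | nil => simp [pvSplit]
  | cons c rest ih =>
    intro t pre h
    simp only [List.mem_cons, not_or] at h
    have hc : ¬ c = '\n' := fun h' => h.1 h'.symm
    simp [pvSplit, hc, ih t (pre ++ [c]) h.2]

lemma pvSplit_head : ∀ (t pre : List Char), ∃ rest,
    pvSplit pre t = (pre ++ t.takeWhile (· ≠ '\n')) :: rest := by
  intro t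
  induction t with
  | nil => intro pre; exact ⟨[], by simp [pvSplit]⟩
  | cons c rest ih =>
    intro pre
    by_cases hc : c = '\n'
    · subst hc; exact ⟨pvSplit [] rest, by simp [pvSplit]⟩
    · obtain ⟨r, hr⟩ := ih (pre ++ [c])
      exact ⟨r, by simp [pvSplit, hc, hr]⟩

lemma prefix_takeWhile {p : Char → Bool} : ∀ (M l : List Char), (∀ a ∈ M, p a = true) →
    M <+: l → M <+: l.takeWhile p := by
  intro M
  induction M with
  | nil => simp
  | cons a M' ih =>
    intro l hall hp
    cases l with
    | nil => simp at hp
    | cons b l' =>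
      rw [List.cons_prefix_cons] at hp
      obtain ⟨rfl, hp'⟩ := hp
      rw [List.takeWhile_cons, if_pos (hall a (by simp))]
      exact List.cons_prefix_cons.2 ⟨rfl, ih l' (fun x hx => hall x (by simp [hx])) hp'⟩

lemma find_eq_of (s sub : List Char) (j : Nat) (hj : sub <+: s.drop j)
    (hmin : ∀ i < j, ¬ sub <+: s.drop i) : PySem.Chars.find s sub = j := by
  have hin : PySem.Chars.isIn sub s = true :=
    (PySem.Chars.exists_prefix_drop_iff_isIn sub s).1 ⟨j, hj⟩
  have h0 : 0 ≤ PySem.Chars.find s sub :=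
    (PySem.Chars.find_nonneg_iff s sub).2 ((PySem.Chars.isIn_iff_infix sub s).1 hin)
  obtain ⟨h1, h2⟩ := PySem.Chars.find_spec h0
  have : (PySem.Chars.find s sub).toNat = j := by
    rcases Nat.lt_trichotomy (PySem.Chars.find s sub).toNat j with h | h | h
    · exact absurd h1 (hmin _ h)
    · exact h
    · exact absurd hj (h2 j h)
  omega

lemma no_occur_lt (l0 t M : List Char) (h0 : '\n' ∉ l0) :
    ∀ i < l0.length, ¬ ('\n' :: M) <+: (l0 ++ '\n' :: t).drop i := by
  intro i hi hp
  rw [List.drop_append_of_le_length (by omega)] at hp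
  cases hd : l0.drop i with
  | nil => have := List.length_drop (l := l0) (i := i); rw [hd] at this; simp at this; omega
  | cons d ds =>
    rw [hd] at hp
    simp only [List.cons_append, List.cons_prefix_cons] at hp
    have : d ∈ l0 := by
      have : d ∈ l0.drop i := by rw [hd]; simp
      exact List.mem_of_mem_drop this
    exact h0 (hp.1 ▸ this)

lemma drop_shift (l0 t : List Char) (k : Nat) :
    (l0 ++ '\n' :: t).drop (l0.length + 1 + k) = t.drop k := by
  rw [show l0.length + 1 + k = l0.length + (1 + k) by omega, List.drop_append]
  simp [List.drop_eq_nil_of_le, Nat.add_comm 1 k]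

lemma find_marker (l0 t M : List Char) (h0 : '\n' ∉ l0) (hmt : M <+: t) :
    PySem.Chars.find (l0 ++ '\n' :: t) ('\n' :: M) = l0.length := by
  apply find_eq_of
  · rw [List.drop_left]
    exact List.cons_prefix_cons.2 ⟨rfl, hmt⟩
  · exact no_occur_lt l0 t M h0

lemma occur_cases (l0 t M : List Char) (h0 : '\n' ∉ l0) (j : Nat)
    (hp : ('\n' :: M) <+: (l0 ++ '\n' :: t).drop j) :
    (j = l0.length ∧ M <+: t) ∨ (∃ k, j = l0.length + 1 + k ∧ ('\n' :: M) <+: t.drop k) := by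
  rcases Nat.lt_trichotomy j l0.length with h | h | h
  · exact absurd hp (no_occur_lt l0 t M h0 j h)
  · subst h
    rw [List.drop_left] at hp
    exact Or.inl ⟨rfl, (List.cons_prefix_cons.1 hp).2⟩
  · refine Or.inr ⟨j - l0.length - 1, by omega, ?_⟩
    rw [show j = l0.length + 1 + (j - l0.length - 1) by omega, drop_shift] at hp
    exact hp

lemma find_none (l0 t M : List Char) (h0 : '\n' ∉ l0) (hmt : ¬ M <+: t)
    (hf : PySem.Chars.find t ('\n' :: M) = -1) :
    PySem.Chars.find (l0 ++ '\n' :: t) ('\n' :: M) = -1 := by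
  rw [PySem.Chars.find_eq_neg_one_iff] at hf ⊢
  intro hin
  obtain ⟨j, hj⟩ := (PySem.Chars.exists_prefix_drop_iff_isIn _ _).2
    ((PySem.Chars.isIn_iff_infix _ _).2 hin)
  rcases occur_cases l0 t M h0 j hj with ⟨_, h⟩ | ⟨k, _, h⟩
  · exact hmt h
  · exact hf ((PySem.Chars.isIn_iff_infix _ _).1
      ((PySem.Chars.exists_prefix_drop_iff_isIn _ _).1 ⟨k, h⟩))

lemma find_shift (l0 t M : List Char) (h0 : '\n' ∉ l0) (hmt : ¬ M <+: t)
    (hf : PySem.Chars.find t ('\n' :: M) ≠ -1) :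
    PySem.Chars.find (l0 ++ '\n' :: t) ('\n' :: M) =
      (l0.length : Int) + 1 + PySem.Chars.find t ('\n' :: M) := by
  have h0f : 0 ≤ PySem.Chars.find t ('\n' :: M) := by
    have := PySem.Chars.neg_one_le_find t ('\n' :: M); omega
  obtain ⟨h1, h2⟩ := PySem.Chars.find_spec h0f
  set k := (PySem.Chars.find t ('\n' :: M)).toNat with hk
  have : PySem.Chars.find (l0 ++ '\n' :: t) ('\n' :: M) = (l0.length + 1 + k : Nat) := by
    apply find_eq_of
    · rw [drop_shift]; exact h1
    · intro i hi hp
      rcases occur_cases l0 t M h0 i hp with ⟨_, h⟩ | ⟨k', hk', h⟩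
      · exact hmt h
      · exact h2 k' (by omega) h
  rw [this]; push_cast; omega

def pvA (M cs : List Char) : List Char :=
  PySem.Chars.join ['\n']
    (List.takeWhile (fun l => !(PySem.Chars.startswith l M)) (pvSplit [] cs))

def pvAlt (M cs : List Char) : List Char :=
  if PySem.Chars.startswith cs M then []
  else if PySem.Chars.find cs ('\n' :: M) = -1 then cs
  else List.take (PySem.Chars.find cs ('\n' :: M)).toNat cs

lemma main_single (M : List Char) (cs : List Char) (h0 : '\n' ∉ cs) :
    pvA M cs = pvAlt M cs := by
  unfold pvA pvAlt
  rw [pvSplit_no_nl cs [] h0]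
  by_cases hm : PySem.Chars.startswith cs M
  · simp [hm, PySem.Chars.join_nil]
  · have hf : PySem.Chars.find cs ('\n' :: M) = -1 := by
      rw [PySem.Chars.find_eq_neg_one_iff]
      intro hin
      exact h0 (hin.subset (by simp))
    simp [hm, hf, PySem.Chars.join_singleton]

lemma main_char (M : List Char) (hM : '\n' ∉ M) :
    ∀ (n : Nat) (cs : List Char), cs.length ≤ n → pvA M cs = pvAlt M cs := by
  intro n
  induction n with
  | zero =>
    intro cs hlen
    have : cs = [] := by cases cs <;> simp_all
    subst this
    exact main_single M [] (by simp)
  | succ n ih =>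
    intro cs hlen
    have hsplit : cs.takeWhile (· ≠ '\n') ++ cs.dropWhile (· ≠ '\n') = cs :=
      List.takeWhile_append_dropWhile
    have h0 : '\n' ∉ cs.takeWhile (· ≠ '\n') := by
      intro h
      have := List.mem_takeWhile_imp h
      simp at this
    cases hr : cs.dropWhile (· ≠ '\n') with
    | nil =>
      refine main_single M cs ?_
      rw [← hsplit, hr, List.append_nil]
      exact h0
    | cons c t =>
      have hc : c = '\n' := by
        have hne : cs.dropWhile (· ≠ '\n') ≠ [] := by rw [hr]; simp
        have h := List.head_dropWhile_not (· ≠ '\n') hne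
        have h2 : (cs.dropWhile (· ≠ '\n')).head hne = c := by
          have h3 := congrArg List.head? hr
          rw [List.head?_eq_some_head hne] at h3
          simpa using h3
        rw [h2] at h
        simpa using h
      subst hc
      set l0 := cs.takeWhile (· ≠ '\n') with hl0def
      rw [hr] at hsplit
      -- cs = l0 ++ '\n' :: t
      have hcs : cs = l0 ++ '\n' :: t := hsplit.symm
      have htlen : t.length ≤ n := by
        have : cs.length = l0.length + 1 + t.length := by rw [hcs]; simp; omega
        omega
      have hsplitcs : pvSplit [] cs = l0 :: pvSplit [] t := by
        rw [hcs, pvSplit_decomp l0 t [] h0, List.nil_append]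
      by_cases hl0 : M <+: l0
      · have hmcs : PySem.Chars.startswith cs M = true :=
          (PySem.Chars.startswith_iff cs M).2 (hl0.trans (by rw [hcs]; exact List.prefix_append l0 _))
        have hpl0 : PySem.Chars.startswith l0 M = true := (PySem.Chars.startswith_iff l0 M).2 hl0
        unfold pvA pvAlt
        rw [hsplitcs]
        simp [hmcs, hpl0, PySem.Chars.join_nil]
      · have hmcs : ¬ M <+: cs := by
          intro h
          apply hl0
          have := prefix_takeWhile (p := (· ≠ '\n')) M cs (by intro a ha; simp; intro h'; exact hM (h' ▸ ha)) h
          rwa [← hl0def] at this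
        have hswcs : PySem.Chars.startswith cs M = false := by
          rw [← Bool.not_eq_true, PySem.Chars.startswith_iff]; exact hmcs
        have hpl0 : PySem.Chars.startswith l0 M = false := by
          rw [← Bool.not_eq_true, PySem.Chars.startswith_iff]; exact hl0
        obtain ⟨rest, hrest⟩ := pvSplit_head t []
        rw [List.nil_append] at hrest
        by_cases hmt : M <+: t
        · -- marker is the first line of t: A keeps exactly l0, B cuts at find = l0.length
          have hmtw : M <+: t.takeWhile (· ≠ '\n') :=
            prefix_takeWhile M t (by intro a ha; simp; intro h'; exact hM (h' ▸ ha)) hmt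
          have hswh : PySem.Chars.startswith (t.takeWhile (· ≠ '\n')) M = true :=
            (PySem.Chars.startswith_iff _ M).2 hmtw
          have hfind : PySem.Chars.find cs ('\n' :: M) = l0.length := by
            rw [hcs]; exact find_marker l0 t M h0 hmt
          unfold pvA pvAlt
          rw [hsplitcs, hrest]
          simp only [List.takeWhile_cons, hpl0, hswh, Bool.not_true, Bool.not_false,
            Bool.false_eq_true, if_true, if_false]
          rw [PySem.Chars.join_singleton]
          rw [hswcs]
          simp only [Bool.false_eq_true, if_false]
          rw [hfind, if_neg (by omega)]
          simp [hcs]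
        · have hswh2 : PySem.Chars.startswith (t.takeWhile (· ≠ '\n')) M = false := by
            rw [← Bool.not_eq_true, PySem.Chars.startswith_iff]
            intro h
            exact hmt (h.trans (List.takeWhile_prefix _))
          have hswt : PySem.Chars.startswith t M = false := by
            rw [← Bool.not_eq_true, PySem.Chars.startswith_iff]; exact hmt
          have hA : pvA M cs = l0 ++ '\n' :: pvA M t := by
            unfold pvA
            rw [hsplitcs, hrest]
            simp only [List.takeWhile_cons, hpl0, hswh2, Bool.not_false, if_true]
            rw [PySem.Chars.join_cons_cons]
            simp
          rw [hA, ih t htlen]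
          unfold pvAlt
          rw [hswcs, hswt]
          simp only [Bool.false_eq_true, if_false]
          by_cases hft : PySem.Chars.find t ('\n' :: M) = -1
          · have hfc : PySem.Chars.find cs ('\n' :: M) = -1 := by
              rw [hcs]; exact find_none l0 t M h0 hmt hft
            rw [if_pos hft, if_pos hfc, hcs]
          · have h0f : 0 ≤ PySem.Chars.find t ('\n' :: M) := by
              have := PySem.Chars.neg_one_le_find t ('\n' :: M); omega
            have hfs : PySem.Chars.find cs ('\n' :: M) =
                (l0.length : Int) + 1 + PySem.Chars.find t ('\n' :: M) := by
              rw [hcs]; exact find_shift l0 t M h0 hmt hft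
            rw [if_neg hft, if_neg (by rw [hfs]; omega), hfs, hcs]
            rw [show ((l0.length : Int) + 1 + PySem.Chars.find t ('\n' :: M)).toNat
                = l0.length + (1 + (PySem.Chars.find t ('\n' :: M)).toNat) by omega]
            rw [List.take_append]
            simp [Nat.add_comm 1]

lemma loop_eq : ∀ (lines : List String) (acc : List String),
    clean_note_loop lines acc =
      acc.reverse ++ lines.takeWhile (fun l => !(PySem.Str.startswith l "! NOTE ! ")) := by
  intro lines
  induction lines with
  | nil => intro acc; simp [clean_note_loop]
  | cons line rest ih =>
    intro acc
    by_cases h : PySem.Str.startswith line "! NOTE ! " = true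
    · simp only [clean_note_loop, List.takeWhile_cons, h]
      simp
    · have h' : PySem.Str.startswith line "! NOTE ! " = false := by simpa using h
      simp only [clean_note_loop, h', ih, List.takeWhile_cons]
      simp

lemma clean_note_eq_alt : ∀ doc : String, clean_note doc = clean_note_alt doc := by
  intro doc
  have hMeq : "! NOTE ! ".toList = ['!', ' ', 'N', 'O', 'T', 'E', ' ', '!', ' '] := by decide
  have hNLeq : "\n! NOTE ! ".toList = '\n' :: ['!', ' ', 'N', 'O', 'T', 'E', ' ', '!', ' '] := by
    decide
  have key := main_char ['!', ' ', 'N', 'O', 'T', 'E', ' ', '!', ' '] (by decide)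
    doc.toList.length doc.toList le_rfl
  have hsplit : PySem.Str.split? doc "\n" =
      some (List.map String.ofList (pvSplit [] doc.toList)) := by
    simp [PySem.Str.split?, PySem.Chars.split?]
    rw [splitOn_eq]
  have hlhs : (clean_note doc).toList = pvA ['!', ' ', 'N', 'O', 'T', 'E', ' ', '!', ' '] doc.toList := by
    rw [clean_note, hsplit]
    rw [PySem.Str.toList_join, loop_eq, List.reverse_nil, List.nil_append]
    rw [List.takeWhile_map, List.map_map]
    unfold pvA
    simp [Function.comp_def, PySem.Str.startswith_eq, String.toList_ofList, hMeq]
  have hrhs : (clean_note_alt doc).toList =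
      pvAlt ['!', ' ', 'N', 'O', 'T', 'E', ' ', '!', ' '] doc.toList := by
    unfold clean_note_alt pvAlt
    simp only [PySem.Str.startswith_eq, PySem.Str.find_eq, hMeq, hNLeq]
    split_ifs with h1 h2
    · simp
    · rfl
    · rw [PySem.Str.toList_slice]
      refine PySem.List.slice_to _ ?_
      have := PySem.Chars.neg_one_le_find doc.toList
        ('\n' :: ['!', ' ', 'N', 'O', 'T', 'E', ' ', '!', ' '])
      omega
  rw [← String.ofList_toList (s := clean_note doc), hlhs, key, ← hrhs, String.ofList_toList]

-- ===== VERDICT (by name: the statement is the Claim_ definition above) =====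
theorem clean_note_spec : Claim_equal_clean_note := by
  intro doc _
  exact clean_note_eq_alt doc
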